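-- pv_equiv track=rewrite | github.com/easttennesseecc-star/Q-Top-Dog-IDE | backend/q_assistant_scope.py | generate_simple_database_schema
-- ===== SOURCE A (Python) =====
-- from typing import Dict, List, Any
--
-- def generate_simple_database_schema(tables: List[str]) -> str:
--     """Generate a simple SVG database schema diagram"""
--     svg = """<svg width="800" height="600" xmlns="http://www.w3.org/2000/svg">
--   <text x="400" y="30" font-family="Arial" font-size="16" font-weight="bold" text-anchor="middle" fill="#333">Database Schema</text>
--   """
--
--     # Draw simple tables
--     y_pos = 80
--     for i, table in enumerate(tables):
--         x_pos = 50 + (i % 2) * 400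
--         if i > 0 and i % 2 == 0:
--             y_pos += 200
--
--         # Table box
--         svg += f"""  <rect x="{x_pos}" y="{y_pos}" width="300" height="120" fill="#fff" stroke="#1976d2" stroke-width="2" rx="3"/>
--   <rect x="{x_pos}" y="{y_pos}" width="300" height="30" fill="#e3f2fd" stroke="#1976d2" stroke-width="2" rx="3"/>
--   <text x="{x_pos + 150}" y="{y_pos + 20}" font-family="Arial" font-size="13" font-weight="bold" text-anchor="middle" fill="#333">{table}</text>
--   <text x="{x_pos + 10}" y="{y_pos + 50}" font-family="Arial" font-size="11" fill="#666">• id (primary key)</text>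
--   <text x="{x_pos + 10}" y="{y_pos + 70}" font-family="Arial" font-size="11" fill="#666">• [Column fields...]</text>
--   <text x="{x_pos + 10}" y="{y_pos + 90}" font-family="Arial" font-size="11" fill="#666">• [Relationships...]</text>
-- """
--
--     svg += """</svg>"""
--     return svg
-- ===== SOURCE B (Python) =====
-- def generate_simple_database_schema(tables):
--     """Generate a simple SVG database schema diagram"""
--
--     def block(x, y, table):
--         return (
--             f'  <rect x="{x}" y="{y}" width="300" height="120" fill="#fff" stroke="#1976d2" stroke-width="2" rx="3"/>\n'
--             f'  <rect x="{x}" y="{y}" width="300" height="30" fill="#e3f2fd" stroke="#1976d2" stroke-width="2" rx="3"/>\n'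
--             f'  <text x="{x + 150}" y="{y + 20}" font-family="Arial" font-size="13" font-weight="bold" text-anchor="middle" fill="#333">{table}</text>\n'
--             f'  <text x="{x + 10}" y="{y + 50}" font-family="Arial" font-size="11" fill="#666">\u2022 id (primary key)</text>\n'
--             f'  <text x="{x + 10}" y="{y + 70}" font-family="Arial" font-size="11" fill="#666">\u2022 [Column fields...]</text>\n'
--             f'  <text x="{x + 10}" y="{y + 90}" font-family="Arial" font-size="11" fill="#666">\u2022 [Relationships...]</text>\n'
--         )
--
--     parts = [
--         '<svg width="800" height="600" xmlns="http://www.w3.org/2000/svg">\n'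
--         '  <text x="400" y="30" font-family="Arial" font-size="16" font-weight="bold" text-anchor="middle" fill="#333">Database Schema</text>\n'
--         '  '
--     ]
--     # Lay out the tables a ROW at a time: each row holds up to two tables, the
--     # left one at x=50 and the right one at x=450; y advances by 200 per row.
--     n = len(tables)
--     y = 80
--     i = 0
--     while i < n:
--         parts.append(block(50, y, tables[i]))
--         if i + 1 < n:
--             parts.append(block(450, y, tables[i + 1]))
--         y += 200
--         i += 2
--     parts.append('</svg>')
--     return ''.join(parts)
-- ===== Notes on version B (the rewrite author's own statement) =====
-- stated objective: alternative
-- what changed: B lays the diagram out a ROW (pair of tables) at a time with constant x positions 50/450 and y advancing once per row, collecting blocks in a list joined at the end, instead of A's per-index loop with i%2 arithmetic, a running y_pos with a conditional bump, and string +=.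
import Mathlib
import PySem

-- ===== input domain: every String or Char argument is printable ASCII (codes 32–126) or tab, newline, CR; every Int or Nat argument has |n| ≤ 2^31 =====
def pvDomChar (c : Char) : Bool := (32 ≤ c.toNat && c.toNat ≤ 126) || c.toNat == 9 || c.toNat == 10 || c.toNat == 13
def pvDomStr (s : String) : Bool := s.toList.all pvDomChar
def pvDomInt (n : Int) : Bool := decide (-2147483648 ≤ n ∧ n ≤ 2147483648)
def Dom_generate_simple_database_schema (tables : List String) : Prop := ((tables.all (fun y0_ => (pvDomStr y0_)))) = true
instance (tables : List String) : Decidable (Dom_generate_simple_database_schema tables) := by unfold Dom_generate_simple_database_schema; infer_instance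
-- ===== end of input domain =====

-- B lays the diagram out a row (pair of tables) at a time with constant x = 50/450 and y
-- advancing per row, instead of A's per-index loop with i%2 arithmetic and a running y_pos;
-- objective: alternative decomposition, byte-for-byte equal output (no speed claim).

-- ===== PORT A =====
-- helper: A's per-table f-string block with x_pos/y_pos interpolated (exact text of Source A)
def pvBlock (x y : Int) (table : String) : String :=
  "  <rect x=\""
    ++ PySem.Int.toStr x
    ++ "\" y=\""
    ++ PySem.Int.toStr y
    ++ "\" width=\"300\" height=\"120\" fill=\"#fff\" stroke=\"#1976d2\" stroke-width=\"2\" rx=\"3\"/>\n  <rect x=\""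
    ++ PySem.Int.toStr x
    ++ "\" y=\""
    ++ PySem.Int.toStr y
    ++ "\" width=\"300\" height=\"30\" fill=\"#e3f2fd\" stroke=\"#1976d2\" stroke-width=\"2\" rx=\"3\"/>\n  <text x=\""
    ++ PySem.Int.toStr (x + 150)
    ++ "\" y=\""
    ++ PySem.Int.toStr (y + 20)
    ++ "\" font-family=\"Arial\" font-size=\"13\" font-weight=\"bold\" text-anchor=\"middle\" fill=\"#333\">"
    ++ table
    ++ "</text>\n  <text x=\""
    ++ PySem.Int.toStr (x + 10)
    ++ "\" y=\""
    ++ PySem.Int.toStr (y + 50)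
    ++ "\" font-family=\"Arial\" font-size=\"11\" fill=\"#666\">• id (primary key)</text>\n  <text x=\""
    ++ PySem.Int.toStr (x + 10)
    ++ "\" y=\""
    ++ PySem.Int.toStr (y + 70)
    ++ "\" font-family=\"Arial\" font-size=\"11\" fill=\"#666\">• [Column fields...]</text>\n  <text x=\""
    ++ PySem.Int.toStr (x + 10)
    ++ "\" y=\""
    ++ PySem.Int.toStr (y + 90)
    ++ "\" font-family=\"Arial\" font-size=\"11\" fill=\"#666\">• [Relationships...]</text>\n"

-- the fixed header text shared by both Pythons
def pvHeader : String :=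
  "<svg width=\"800\" height=\"600\" xmlns=\"http://www.w3.org/2000/svg\">\n  <text x=\"400\" y=\"30\" font-family=\"Arial\" font-size=\"16\" font-weight=\"bold\" text-anchor=\"middle\" fill=\"#333\">Database Schema</text>\n  "

def generate_simple_database_schema (tables : List String) : String :=
  let st := (PySem.List.enumerate tables).foldl
    (fun (st : String × Int) (p : Int × String) =>
      let x_pos : Int := 50 + (PySem.Int.mod p.1 2) * 400
      let y_pos : Int := if 0 < p.1 ∧ PySem.Int.mod p.1 2 = 0 then st.2 + 200 else st.2
      (st.1 ++ pvBlock x_pos y_pos p.2, y_pos))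
    (pvHeader, 80)
  st.1 ++ "</svg>"

-- ===== PORT B =====
-- Source B's while loop taking two tables (one row) per iteration: the list is consumed
-- two at a time, left block at x=50, optional right block at x=450, y advancing by 200.
def pvRows : List String → Int → String
  | [], _ => ""
  | [t], y => pvBlock 50 y t
  | t1 :: t2 :: rest, y =>
      pvBlock 50 y t1 ++ (pvBlock 450 y t2 ++ pvRows rest (y + 200))

def generate_simple_database_schema_alt (tables : List String) : String :=
  pvHeader ++ pvRows tables 80 ++ "</svg>"

-- ===== PRECONDITION & SPEC =====
def Spec_generate_simple_database_schema (tables : List String) (out : String) : Prop := out = generate_simple_database_schema_alt tables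
instance (tables : List String) (out : String) : Decidable (Spec_generate_simple_database_schema tables out) := by unfold Spec_generate_simple_database_schema; infer_instance

-- ===== CLAIM =====
def Claim_equal_generate_simple_database_schema : Prop := ∀ (tables : List String), Dom_generate_simple_database_schema tables → Spec_generate_simple_database_schema tables (generate_simple_database_schema tables)

-- ===== LEMMAS AND PROOFS =====

-- A's loop body as a named step function (definitionally the lambda inside the port)
def pvStepA (st : String × Int) (p : Int × String) : String × Int :=
  let x_pos : Int := 50 + (PySem.Int.mod p.1 2) * 400
  let y_pos : Int := if 0 < p.1 ∧ PySem.Int.mod p.1 2 = 0 then st.2 + 200 else st.2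
  (st.1 ++ pvBlock x_pos y_pos p.2, y_pos)

-- the y value A's loop STORES when it is about to process index 2*k (the previous row's y)
def pvYin (k : Nat) : Int := if k = 0 then 80 else 80 + 200 * ((k : Int) - 1)

-- two-at-a-time list induction principle matching pvRows' recursion pattern
theorem pv_two_ind (P : List String → Prop) (h0 : P []) (h1 : ∀ t, P [t])
    (h2 : ∀ a b l, P l → P (a :: b :: l)) : ∀ l, P l
  | [] => h0
  | [t] => h1 t
  | a :: b :: l => h2 a b l (pv_two_ind P h0 h1 h2 l)

theorem pv_mod_even (k : Nat) : PySem.Int.mod (2 * (k : Int)) 2 = 0 := by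
  rw [PySem.Int.mod_eq_emod_of_pos (by norm_num)]; omega

theorem pv_mod_odd (k : Nat) : PySem.Int.mod (2 * (k : Int) + 1) 2 = 1 := by
  rw [PySem.Int.mod_eq_emod_of_pos (by norm_num)]; omega

theorem pv_step_even (k : Nat) (acc t : String) :
    pvStepA (acc, pvYin k) (2 * (k : Int), t)
      = (acc ++ pvBlock 50 (80 + 200 * (k : Int)) t, 80 + 200 * (k : Int)) := by
  simp only [pvStepA, pv_mod_even]
  rcases Nat.eq_zero_or_pos k with rfl | hk
  · norm_num [pvYin]
  · split_ifs with h
    · unfold pvYin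
      rw [if_neg (by omega)]
      norm_num
      ring_nf
      trivial
    · exact absurd ⟨by omega, by trivial⟩ h

theorem pv_step_odd (k : Nat) (y : Int) (acc t : String) :
    pvStepA (acc, y) (2 * (k : Int) + 1, t) = (acc ++ pvBlock 450 y t, y) := by
  simp only [pvStepA, pv_mod_odd]
  rw [if_neg (by omega)]
  norm_num

set_option maxHeartbeats 1000000 in
-- invariant: the fold from even index 2*k with stored y = pvYin k appends exactly B's rows
theorem pv_fold_rows (l : List String) : ∀ (k : Nat) (acc : String),
    (List.foldl pvStepA (acc, pvYin k) (PySem.List.enumerate l (2 * (k : Int)))).1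
      = acc ++ pvRows l (80 + 200 * (k : Int)) := by
  induction l using pv_two_ind with
  | h0 =>
    intro k acc
    simp [PySem.List.enumerate_nil, pvRows]
  | h1 t =>
    intro k acc
    rw [PySem.List.enumerate_cons, PySem.List.enumerate_nil, List.foldl_cons, List.foldl_nil,
        pv_step_even]
    rfl
  | h2 a b l ih =>
    intro k acc
    rw [PySem.List.enumerate_cons, PySem.List.enumerate_cons, List.foldl_cons, List.foldl_cons,
        pv_step_even, pv_step_odd]
    have hidx : 2 * (k : Int) + 1 + 1 = 2 * ((k + 1 : Nat) : Int) := by push_cast; ring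
    have hin : pvYin (k + 1) = 80 + 200 * (k : Int) := by
      unfold pvYin; rw [if_neg (by omega)]; push_cast; ring
    have hy2 : 80 + 200 * (((k : Nat) + 1 : Nat) : Int) = 80 + 200 * (k : Int) + 200 := by
      push_cast; ring
    have H := ih (k + 1)
      (acc ++ pvBlock 50 (80 + 200 * (k : Int)) a ++ pvBlock 450 (80 + 200 * (k : Int)) b)
    rw [hin, hy2] at H
    rw [hidx, H]
    simp only [pvRows]
    rw [String.append_assoc, String.append_assoc]

-- ===== VERDICT =====
theorem generate_simple_database_schema_spec : Claim_equal_generate_simple_database_schema := by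
  intro tables _
  show generate_simple_database_schema tables = generate_simple_database_schema_alt tables
  have h := pv_fold_rows tables 0 pvHeader
  have h0 : pvYin 0 = (80 : Int) := rfl
  rw [h0] at h
  norm_num at h
  unfold generate_simple_database_schema generate_simple_database_schema_alt
  show (List.foldl pvStepA (pvHeader, 80) (PySem.List.enumerate tables 0)).1 ++ "</svg>" = _
  rw [h]
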